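-- pv_equiv track=rewrite | github.com/marcndo/algo_ds_playground | problems/two_pointers/subarray_max_sum.py | get_max_sum_subarray
-- ===== SOURCE A (Python) =====
-- def get_max_sum_subarray(array, sub_array_length):
--     n = len(array)
--     if n < sub_array_length:
--         return 0
--     window_sums = []
--     for i in range(n - sub_array_length+1):
--         running_sum = 0
--         for j in range(i+1, sub_array_length+i):
--             if array[j-1] != array[j]:
--                 running_sum += array[j]
--         window_sums.append((running_sum + array[i]))
--     return max(window_sums)
-- ===== SOURCE B (Python) =====
-- def get_max_sum_subarray(array, sub_array_length):
--     n = len(array)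
--     if n < sub_array_length:
--         return 0
--     # contribution of each element inside a window (first element always counts;
--     # a later element counts only when it differs from its predecessor)
--     contrib = [array[0]] + [array[j] if array[j] != array[j - 1] else 0
--                             for j in range(1, n)]
--     prefix = [0]
--     for x in contrib:
--         prefix.append(prefix[-1] + x)
--     return max(array[i] + prefix[i + sub_array_length] - prefix[i + 1]
--                for i in range(n - sub_array_length + 1))
-- ===== Notes on version B (the rewrite author's own statement) =====
-- stated objective: faster
-- what changed: B precomputes each element's duplicate-skipping contribution once, builds a prefix-sum list, and reads every window in O(1) instead of A's inner rescan of each window.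
import Mathlib
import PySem

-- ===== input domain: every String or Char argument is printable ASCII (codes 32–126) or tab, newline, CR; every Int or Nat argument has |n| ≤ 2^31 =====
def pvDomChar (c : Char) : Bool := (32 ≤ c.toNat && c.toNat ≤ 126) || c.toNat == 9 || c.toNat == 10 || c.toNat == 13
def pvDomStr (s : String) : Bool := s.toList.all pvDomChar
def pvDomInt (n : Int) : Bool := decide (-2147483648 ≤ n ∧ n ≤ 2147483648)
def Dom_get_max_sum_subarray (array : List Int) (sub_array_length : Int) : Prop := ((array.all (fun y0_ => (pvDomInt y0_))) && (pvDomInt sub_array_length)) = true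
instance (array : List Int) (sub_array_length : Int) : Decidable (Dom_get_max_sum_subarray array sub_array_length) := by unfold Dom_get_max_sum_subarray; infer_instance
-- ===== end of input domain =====

-- B replaces A's per-window re-scan by per-element contributions and prefix sums,
-- answering each window in O(1) (objective: faster).

-- ===== PORT A =====
def get_max_sum_subarray (array : List Int) (sub_array_length : Int) : Int :=
  let n : Int := (array.length : Int)
  if n < sub_array_length then 0
  else
    let window_sums : List Int :=
      (PySem.List.pyRange 0 (n - sub_array_length + 1)).foldl (fun ws i =>
        let running_sum : Int :=
          (PySem.List.pyRange (i + 1) (sub_array_length + i)).foldl (fun s j =>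
            if PySem.List.pyGetD array (j - 1) 0 ≠ PySem.List.pyGetD array j 0
            then s + PySem.List.pyGetD array j 0 else s) 0
        ws ++ [running_sum + PySem.List.pyGetD array i 0]) []
    (PySem.List.max? window_sums id).getD 0

-- ===== PORT B =====
def get_max_sum_subarray_alt (array : List Int) (sub_array_length : Int) : Int :=
  let n : Int := (array.length : Int)
  if n < sub_array_length then 0
  else
    let contrib : List Int :=
      [PySem.List.pyGetD array 0 0] ++
        (PySem.List.pyRange 1 n).map (fun j =>
          if PySem.List.pyGetD array j 0 ≠ PySem.List.pyGetD array (j - 1) 0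
          then PySem.List.pyGetD array j 0 else 0)
    let prefx : List Int :=
      contrib.foldl (fun p x => p ++ [PySem.List.pyGetD p (-1) 0 + x]) [0]
    (PySem.List.max? ((PySem.List.pyRange 0 (n - sub_array_length + 1)).map (fun i =>
      PySem.List.pyGetD array i 0 + PySem.List.pyGetD prefx (i + sub_array_length) 0
        - PySem.List.pyGetD prefx (i + 1) 0)) id).getD 0

-- ===== PRECONDITION & SPEC =====
-- Pre_ excludes only sub_array_length ≤ 0, on which A always raises IndexError
-- (its window loop reads array[len(array)]).
def Pre_get_max_sum_subarray (array : List Int) (sub_array_length : Int) : Prop :=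
  1 ≤ sub_array_length
instance (array : List Int) (sub_array_length : Int) : Decidable (Pre_get_max_sum_subarray array sub_array_length) := by unfold Pre_get_max_sum_subarray; infer_instance

def pvWitness_get_max_sum_subarray : List Int × Int := ([1, 2, 2, 3], 2)

def Spec_get_max_sum_subarray (array : List Int) (sub_array_length : Int) (out : Int) : Prop := out = get_max_sum_subarray_alt array sub_array_length
instance (array : List Int) (sub_array_length : Int) (out : Int) : Decidable (Spec_get_max_sum_subarray array sub_array_length out) := by unfold Spec_get_max_sum_subarray; infer_instance

-- ===== CLAIM (what is proved, stated in full; the proofs are below) =====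
def Claim_equal_get_max_sum_subarray : Prop := ∀ (array : List Int) (sub_array_length : Int), Dom_get_max_sum_subarray array sub_array_length → Pre_get_max_sum_subarray array sub_array_length → Spec_get_max_sum_subarray array sub_array_length (get_max_sum_subarray array sub_array_length)

-- ===== LEMMAS AND PROOFS =====

-- a step-1 pyRange is a shifted List.range
theorem pyRange_eq_range_map (a b : Int) :
    PySem.List.pyRange a b = (List.range (b - a).toNat).map (fun t => a + Int.ofNat t) := by
  induction h : (b - a).toNat generalizing a with
  | zero =>
    have : b ≤ a := by omega
    simp [PySem.List.pyRange, this]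
  | succ m ih =>
    have hab : a < b := by omega
    rw [PySem.List.pyRange_one_cons hab, ih (a + 1) (by omega)]
    rw [List.range_succ_eq_map, List.map_cons, List.map_map]
    simp only [List.cons.injEq]
    refine ⟨by simp, List.map_congr_left fun t _ => ?_⟩
    simp only [Function.comp, Int.ofNat_eq_natCast]
    push_cast; ring

-- B's contribution list (the let-bound `contrib` of the B port), as a named helper
def pvContrib (a : List Int) : List Int :=
  [PySem.List.pyGetD a 0 0] ++
    (PySem.List.pyRange 1 (a.length : Int)).map (fun j =>
      if PySem.List.pyGetD a j 0 ≠ PySem.List.pyGetD a (j - 1) 0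
      then PySem.List.pyGetD a j 0 else 0)

theorem pvContrib_length (a : List Int) (h : 1 ≤ a.length) :
    (pvContrib a).length = a.length := by
  simp [pvContrib, pyRange_eq_range_map]
  omega

theorem pvContrib_getD (a : List Int) (j : Nat) (h1 : 1 ≤ j) (h2 : j < a.length) :
    (pvContrib a).getD j 0
      = (if PySem.List.pyGetD a ((j : Int) - 1) 0 ≠ PySem.List.pyGetD a (j : Int) 0
         then PySem.List.pyGetD a (j : Int) 0 else 0) := by
  obtain ⟨j, rfl⟩ : ∃ j', j = j' + 1 := ⟨j - 1, by omega⟩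
  unfold pvContrib
  rw [List.getD_eq_getElem?_getD]
  rw [List.getElem?_append_right (by simp)]
  simp only [List.length_singleton, Nat.add_sub_cancel]
  rw [pyRange_eq_range_map]
  rw [List.map_map]
  have hlt : j < ((a.length : Int) - 1).toNat := by omega
  rw [List.getElem?_eq_getElem (by simpa using hlt)]
  simp only [Option.getD_some, List.getElem_map, List.getElem_range, Function.comp,
    Int.ofNat_eq_natCast]
  push_cast
  rw [show (1 : Int) + (j : Int) = (j : Int) + 1 by ring,
    show (j : Int) + 1 - 1 = (j : Int) by ring]
  split_ifs with hL hR <;> simp_all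

-- Python's xs[-1] on a nonempty list reads the appended last element
theorem pyGetD_neg_one_append (p : List Int) (x : Int) :
    PySem.List.pyGetD (p ++ [x]) (-1) 0 = x := by
  simp [PySem.List.pyGetD, PySem.List.pyGet?, PySem.List.pyIdx?]

-- telescoping: a difference of take-sums is a sum of consecutive entries
theorem take_sum_sub (l : List Int) (lo m : Nat) (h : lo + m ≤ l.length) :
    (l.take (lo + m)).sum - (l.take lo).sum
      = ((List.range m).map (fun t => l.getD (lo + t) 0)).sum := by
  induction m with
  | zero => simp
  | succ m ih =>
    rw [show lo + (m + 1) = (lo + m) + 1 from rfl, List.take_add_one, List.sum_append,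
      List.range_succ, List.map_append, List.sum_append]
    have hb : lo + m < l.length := by omega
    rw [List.getElem?_eq_getElem hb]
    simp only [Option.toList_some, List.sum_singleton, List.map_singleton]
    rw [← ih (by omega)]
    rw [List.getD_eq_getElem l 0 hb]
    ring

-- B's prefix loop builds the list of partial sums
theorem prefix_foldl_eq (l : List Int) :
    l.foldl (fun p x => p ++ [PySem.List.pyGetD p (-1) 0 + x]) [0]
      = (List.range (l.length + 1)).map (fun m => (l.take m).sum) := by
  induction l using List.reverseRecOn with
  | nil => simp
  | append_singleton l x ih =>
    rw [List.foldl_append, ih]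
    simp only [List.foldl_cons, List.foldl_nil]
    have hlast : PySem.List.pyGetD
        ((List.range (l.length + 1)).map (fun m => (l.take m).sum)) (-1) 0
        = (l.take l.length).sum := by
      rw [List.range_succ, List.map_append, List.map_singleton, pyGetD_neg_one_append]
    have hmap : (List.range (l.length + 1)).map (fun m => (l.take m).sum)
        = (List.range (l.length + 1)).map (fun m => ((l ++ [x]).take m).sum) := by
      refine List.map_congr_left fun m hm => ?_
      rw [List.take_append_of_le_length (by simp at hm; omega)]
    rw [hlast, hmap, List.length_append, List.length_singleton]
    conv_rhs => rw [List.range_succ, List.map_append, List.map_singleton]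
    congr 1
    simp [List.take_of_length_le]

-- reading the prefix-sum list at a Nat index
theorem prefx_getD (c : List Int) (m : Nat) (hm : m ≤ c.length) :
    PySem.List.pyGetD (c.foldl (fun p x => p ++ [PySem.List.pyGetD p (-1) 0 + x]) [0]) (m : Int) 0
      = (c.take m).sum := by
  rw [prefix_foldl_eq, PySem.List.pyGetD_natCast, PySem.List.getD_map_range _ _ _ _ (by omega)]

-- the core fact: A's rescanned window equals B's prefix-sum window
theorem window_eq (a : List Int) (k i : Int) (hk : 1 ≤ k) (hkn : k ≤ (a.length : Int))
    (hi0 : 0 ≤ i) (hi : i ≤ (a.length : Int) - k) :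
    ((PySem.List.pyRange (i + 1) (k + i)).foldl (fun s j =>
        if PySem.List.pyGetD a (j - 1) 0 ≠ PySem.List.pyGetD a j 0
        then s + PySem.List.pyGetD a j 0 else s) 0) + PySem.List.pyGetD a i 0
    = PySem.List.pyGetD a i 0
      + PySem.List.pyGetD ((pvContrib a).foldl (fun p x => p ++ [PySem.List.pyGetD p (-1) 0 + x]) [0]) (i + k) 0
      - PySem.List.pyGetD ((pvContrib a).foldl (fun p x => p ++ [PySem.List.pyGetD p (-1) 0 + x]) [0]) (i + 1) 0 := by
  have hclen : (pvContrib a).length = a.length := pvContrib_length a (by omega)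
  have hstep : (fun (s j : Int) =>
      if PySem.List.pyGetD a (j - 1) 0 ≠ PySem.List.pyGetD a j 0
      then s + PySem.List.pyGetD a j 0 else s)
      = fun s j => s + (if PySem.List.pyGetD a (j - 1) 0 ≠ PySem.List.pyGetD a j 0
                        then PySem.List.pyGetD a j 0 else 0) := by
    funext s j; split <;> simp
  rw [hstep, PySem.List.foldl_add, zero_add, pyRange_eq_range_map]
  have e1 : i + k = ((i.toNat + k.toNat : Nat) : Int) := by omega
  have e2 : i + 1 = ((i.toNat + 1 : Nat) : Int) := by omega
  rw [e1, e2, prefx_getD _ _ (by omega), prefx_getD _ _ (by omega)]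
  have e3 : i.toNat + k.toNat = (i.toNat + 1) + (k.toNat - 1) := by omega
  rw [e3]
  have e4 : (k + i - ((i.toNat + 1 : Nat) : Int)).toNat = k.toNat - 1 := by omega
  rw [e4, List.map_map]
  have hpt : ∀ t ∈ List.range (k.toNat - 1),
      ((fun j => if PySem.List.pyGetD a (j - 1) 0 ≠ PySem.List.pyGetD a j 0
                 then PySem.List.pyGetD a j 0 else 0) ∘ fun t => ((i.toNat + 1 : Nat) : Int) + Int.ofNat t) t
      = (pvContrib a).getD (i.toNat + 1 + t) 0 := by
    intro t ht
    simp only [List.mem_range] at ht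
    rw [pvContrib_getD a (i.toNat + 1 + t) (by omega) (by omega)]
    simp only [Function.comp, Int.ofNat_eq_natCast]
    have h5 : ((i.toNat + 1 + t : Nat) : Int) = ((i.toNat + 1 : Nat) : Int) + (t : Int) := by omega
    rw [h5]
  rw [List.map_congr_left hpt, ← take_sum_sub _ _ _ (by omega)]
  ring

-- both programs agree window by window
theorem main_spec (a : List Int) (k : Int) (hk : 1 ≤ k) :
    get_max_sum_subarray a k = get_max_sum_subarray_alt a k := by
  by_cases h : (a.length : Int) < k
  · simp [get_max_sum_subarray, get_max_sum_subarray_alt, h]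
  · simp only [get_max_sum_subarray, get_max_sum_subarray_alt, if_neg h]
    have hlist : (PySem.List.pyRange 0 ((a.length : Int) - k + 1)).foldl (fun ws i =>
        ws ++ [(PySem.List.pyRange (i + 1) (k + i)).foldl (fun s j =>
            if PySem.List.pyGetD a (j - 1) 0 ≠ PySem.List.pyGetD a j 0
            then s + PySem.List.pyGetD a j 0 else s) 0 + PySem.List.pyGetD a i 0]) []
        = (PySem.List.pyRange 0 ((a.length : Int) - k + 1)).map (fun i =>
            PySem.List.pyGetD a i 0
            + PySem.List.pyGetD ((pvContrib a).foldl (fun p x => p ++ [PySem.List.pyGetD p (-1) 0 + x]) [0]) (i + k) 0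
            - PySem.List.pyGetD ((pvContrib a).foldl (fun p x => p ++ [PySem.List.pyGetD p (-1) 0 + x]) [0]) (i + 1) 0) := by
      rw [PySem.List.foldl_append_singleton_eq_map, List.nil_append]
      refine List.map_congr_left fun i hi => ?_
      rw [PySem.List.mem_pyRange_one] at hi
      exact window_eq a k i hk (by omega) hi.1 (by omega)
    exact congrArg (fun l => (PySem.List.max? l id).getD 0) hlist

-- ===== VERDICT (by name: the statement is the Claim_ definition above) =====
theorem get_max_sum_subarray_spec : Claim_equal_get_max_sum_subarray := by
  intro array sub_array_length _ hpre
  exact main_spec array sub_array_length hpre
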